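-- pv_equiv track=rewrite | github.com/TitouanBorderies/Sentiment-analysis-MEPPDS | utils/filter_annotations.py | filter_majority_annotations
-- ===== SOURCE A (Python) =====
-- from collections import defaultdict, Counter
--
-- def filter_majority_annotations(annotations):
--     """Filter annotations by majority label per unique text."""
--     grouped = defaultdict(list)
--
--     for ann in annotations:
--         grouped[ann["text"]].append(ann["label"])
--
--     filtered = []
--     for text, labels in grouped.items():
--         label_counts = Counter(labels)
--         total_votes = sum(label_counts.values())
--         most_common_label, votes = label_counts.most_common(1)[0]
--
--         # Keep only those with a majority vote
--         if votes > total_votes / 2: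
--             filtered.append({"text": text, "label": most_common_label})
--
--     return filtered
-- ===== SOURCE B (Python) =====
-- def filter_majority_annotations(annotations):
--     """Filter annotations by majority label per unique text.
--
--     Staged passes: dedup the texts in first-appearance order, then for each
--     text collect its labels by a filter pass and find the majority label by
--     Boyer-Moore voting (candidate pass + verification count) -- no dict of
--     groups and no per-group frequency table.
--     """
--     texts = list(dict.fromkeys(ann["text"] for ann in annotations))
--     filtered = []
--     for text in texts:
--         labels = [ann["label"] for ann in annotations if ann["text"] == text]
--         cand, cnt = None, 0
--         for lab in labels:
--             if cnt == 0:
--                 cand, cnt = lab, 1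
--             elif lab == cand:
--                 cnt += 1
--             else:
--                 cnt -= 1
--         if 2 * labels.count(cand) > len(labels):
--             filtered.append({"text": text, "label": cand})
--     return filtered
-- ===== Notes on version B (the rewrite author's own statement) =====
-- stated objective: alternative
-- what changed: The defaultdict grouping and per-group Counter/most_common are replaced by staged passes: dedup the texts in first-appearance order, then for each text one filter pass collecting its labels and Boyer-Moore majority voting (candidate pass + verification count) instead of a frequency table.
import Mathlib
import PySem

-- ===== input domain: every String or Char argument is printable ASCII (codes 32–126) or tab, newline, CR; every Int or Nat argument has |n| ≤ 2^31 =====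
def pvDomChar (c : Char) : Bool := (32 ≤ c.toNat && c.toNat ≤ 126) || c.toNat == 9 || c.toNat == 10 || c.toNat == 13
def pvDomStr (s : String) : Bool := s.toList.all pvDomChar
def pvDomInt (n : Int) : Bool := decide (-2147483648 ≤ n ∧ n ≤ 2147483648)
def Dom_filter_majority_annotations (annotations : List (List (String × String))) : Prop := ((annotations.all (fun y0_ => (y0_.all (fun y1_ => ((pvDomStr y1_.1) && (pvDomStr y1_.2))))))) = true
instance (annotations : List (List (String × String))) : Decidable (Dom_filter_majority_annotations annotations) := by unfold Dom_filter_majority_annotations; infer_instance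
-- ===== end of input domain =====

-- B replaces A's dict-of-groups + per-group Counter/most_common by staged passes: dedup the texts, then per text a filter pass and Boyer-Moore majority voting; an alternative algorithm, not claimed faster.


-- ===== PORT A =====
-- grouped = defaultdict(list); grouped[ann["text"]].append(ann["label"]) — ann["k"] ported with
-- getD "" ; Pre_ excludes annotations missing either key (Python raises KeyError there).
def fmaGroupA (annotations : List (List (String × String))) : PySem.Dict String (List String) :=
  annotations.foldl (fun g ann =>
    g.modify (PySem.Dict.getD (PySem.Dict.mk ann) "text" "") []
      (· ++ [PySem.Dict.getD (PySem.Dict.mk ann) "label" ""])) PySem.Dict.empty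

-- Counter.most_common(1)[0] = the first item of maximal count (heapq.nlargest(1) keeps the earliest on ties)
def fmaMostCommon (first : String × Int) (rest : List (String × Int)) : String × Int :=
  rest.foldl (fun b p => if b.2 < p.2 then p else b) first

def filter_majority_annotations (annotations : List (List (String × String))) : List (List (String × String)) :=
  (fmaGroupA annotations).items.foldl (fun filtered tl =>
    let counter := PySem.Dict.counter tl.2
    let total : Int := counter.values.sum
    match counter.items with
    | [] => filtered  -- unreachable: every group's label list is nonempty (Python: most_common(1)[0] would raise IndexError)
    | p :: rest =>
      let bv := fmaMostCommon p rest
      -- 'votes > total_votes / 2' on ints is exactly '2 * votes > total'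
      if 2 * bv.2 > total then filtered ++ [[("text", tl.1), ("label", bv.1)]] else filtered) []

-- ===== PORT B =====
-- ann["text"] / ann["label"], same key port and Pre_ as A's side
def fmbText (ann : List (String × String)) : String := PySem.Dict.getD (PySem.Dict.mk ann) "text" ""
def fmbLabel (ann : List (String × String)) : String := PySem.Dict.getD (PySem.Dict.mk ann) "label" ""

-- the Boyer-Moore candidate loop; cand : Option String (Python: cand starts as None)
def fmbBoyer (labels : List String) : Option String × Int :=
  labels.foldl (fun s lab =>
    if s.2 = 0 then (some lab, 1)
    else if some lab = s.1 then (s.1, s.2 + 1)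
    else (s.1, s.2 - 1)) (none, 0)

-- texts = list(dict.fromkeys(ann["text"] for ann in annotations)); then one filter pass per text
def filter_majority_annotations_alt (annotations : List (List (String × String))) : List (List (String × String)) :=
  (PySem.List.dedup (annotations.map fmbText)).foldl (fun filtered text =>
    let labels := (annotations.filter (fun ann => fmbText ann == text)).map fmbLabel
    match (fmbBoyer labels).1 with
    -- cand is None only for an empty label list, which no deduped text produces
    | none => filtered
    | some c =>
      if 2 * (labels.count c : Int) > (labels.length : Int)
      then filtered ++ [[("text", text), ("label", c)]] else filtered) []

-- ===== PRECONDITION & SPEC =====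
-- Pre_ excludes exactly the annotation dicts lacking a "text" or "label" key, on which Python A raises KeyError.
def Pre_filter_majority_annotations (annotations : List (List (String × String))) : Prop :=
  ∀ ann ∈ annotations, (PySem.Dict.mk ann).contains "text" = true ∧ (PySem.Dict.mk ann).contains "label" = true
instance (annotations : List (List (String × String))) : Decidable (Pre_filter_majority_annotations annotations) := by unfold Pre_filter_majority_annotations; infer_instance
def pvWitness_filter_majority_annotations : (List (List (String × String))) :=
  [[("text", "a"), ("label", "x")], [("text", "a"), ("label", "x")], [("text", "b"), ("label", "y")]]

def Spec_filter_majority_annotations (annotations : List (List (String × String))) (out : List (List (String × String))) : Prop := out = filter_majority_annotations_alt annotations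
instance (annotations : List (List (String × String))) (out : List (List (String × String))) : Decidable (Spec_filter_majority_annotations annotations out) := by unfold Spec_filter_majority_annotations; infer_instance

-- ===== CLAIM (what is proved, stated in full; the proofs are below) =====
def Claim_equal_filter_majority_annotations : Prop := ∀ (annotations : List (List (String × String))), Dom_filter_majority_annotations annotations → Pre_filter_majority_annotations annotations → Spec_filter_majority_annotations annotations (filter_majority_annotations annotations)

-- ===== LEMMAS AND PROOFS =====

-- sum of the per-distinct-label counts is the group size
lemma fma_counter_sum (L : List String) :
    (PySem.Dict.counter L).values.sum = (L.length : Int) := by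
  simp only [PySem.Dict.values, PySem.Dict.items_counter, List.map_map]
  have hperm : (PySem.Set.ofList L).Perm L.dedup := by
    refine (List.perm_ext_iff_of_nodup (PySem.Set.nodup_ofList L) L.nodup_dedup).2 ?_
    intro a; simp [PySem.Set.mem_ofList, List.mem_dedup]
  have hpm := (hperm.map (fun k => ((L.count k : Nat) : Int))).sum_eq
  calc (List.map ((fun k => (k, (L.count k : Int))) · |>.2) (PySem.Set.ofList L)).sum
      = (List.map (fun k => ((L.count k : Nat) : Int)) (PySem.Set.ofList L)).sum := rfl
    _ = (List.map (fun k => ((L.count k : Nat) : Int)) L.dedup).sum := hpm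
    _ = ((List.map (fun x => L.count x) L.dedup).sum : Int) := by push_cast; rw [List.map_map]; rfl
    _ = (L.length : Int) := by rw [List.sum_map_count_dedup_eq_length]

-- fmaMostCommon picks an element of first :: rest with maximal second component
lemma fma_mostCommon_spec (first : String × Int) (rest : List (String × Int)) :
    (fmaMostCommon first rest = first ∨ fmaMostCommon first rest ∈ rest) ∧
    first.2 ≤ (fmaMostCommon first rest).2 ∧
    ∀ p ∈ rest, p.2 ≤ (fmaMostCommon first rest).2 := by
  induction rest generalizing first with
  | nil => simp [fmaMostCommon]
  | cons q t ih =>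
    have step : fmaMostCommon first (q :: t) = fmaMostCommon (if first.2 < q.2 then q else first) t := rfl
    by_cases h : first.2 < q.2
    · simp only [step, if_pos h]
      obtain ⟨hmem, hge, hall⟩ := ih q
      refine ⟨?_, by omega, ?_⟩
      · rcases hmem with h1 | h1
        · right; simp [h1]
        · right; exact List.mem_cons_of_mem _ h1
      · intro p hp
        rcases List.mem_cons.1 hp with rfl | hp
        · exact hge
        · exact hall p hp
    · simp only [step, if_neg h]
      obtain ⟨hmem, hge, hall⟩ := ih first
      refine ⟨?_, hge, ?_⟩
      · rcases hmem with h1 | h1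
        · left; exact h1
        · right; exact List.mem_cons_of_mem _ h1
      · intro p hp
        rcases List.mem_cons.1 hp with rfl | hp
        · omega
        · exact hall p hp

-- Boyer-Moore invariant: any strict majority label must end up as the candidate
lemma fmb_boyer_inv (L : List String) :
    0 ≤ (fmbBoyer L).2 ∧
    ∀ x : String, 2 * (L.count x : Int) ≤ (L.length : Int) +
      (if some x = (fmbBoyer L).1 then (fmbBoyer L).2 else -(fmbBoyer L).2) := by
  induction L using List.reverseRecOn with
  | nil => simp [fmbBoyer]
  | append_singleton t a ih =>
    obtain ⟨hnn, hinv⟩ := ih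
    have step : fmbBoyer (t ++ [a]) =
        (if (fmbBoyer t).2 = 0 then (some a, 1)
         else if some a = (fmbBoyer t).1 then ((fmbBoyer t).1, (fmbBoyer t).2 + 1)
         else ((fmbBoyer t).1, (fmbBoyer t).2 - 1)) := by
      simp [fmbBoyer, List.foldl_append]
    constructor
    · rw [step]; split_ifs <;> dsimp only <;> omega
    · intro x
      have hx := hinv x
      have hcnt : ((t ++ [a]).count x : Int) = (t.count x : Int) + (if a = x then 1 else 0) := by
        by_cases hax : a = x <;> simp [List.count_append, hax]
      rw [step]
      simp only [List.length_append, List.length_singleton, Nat.cast_add, Nat.cast_one, hcnt]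
      by_cases h0 : (fmbBoyer t).2 = 0
      · rw [if_pos h0]
        have hx0 : 2 * (t.count x : Int) ≤ (t.length : Int) := by split_ifs at hx <;> omega
        dsimp only
        by_cases hax : a = x
        · rw [if_pos hax, if_pos (by rw [hax])]; omega
        · rw [if_neg hax, if_neg (by simp; exact fun h => hax h.symm : ¬ some x = some a)]; omega
      · rw [if_neg h0]
        by_cases hcand : some a = (fmbBoyer t).1
        · rw [if_pos hcand]; dsimp only
          by_cases hax : a = x
          · have hxc : some x = (fmbBoyer t).1 := by rw [← hax]; exact hcand
            rw [if_pos hxc] at hx ⊢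
            rw [if_pos hax]; omega
          · have hxc : ¬ some x = (fmbBoyer t).1 := by
              intro h; have := hcand.trans h.symm; exact hax (Option.some.inj this)
            rw [if_neg hxc] at hx ⊢
            rw [if_neg hax]; omega
        · rw [if_neg hcand]; dsimp only
          by_cases hxc : some x = (fmbBoyer t).1
          · have hax : ¬ a = x := fun h => hcand (h ▸ hxc)
            rw [if_pos hxc] at hx ⊢
            rw [if_neg hax]; omega
          · rw [if_neg hxc] at hx ⊢
            by_cases hax : a = x
            · rw [if_pos hax]; omega
            · rw [if_neg hax]; omega

-- A's per-group body (Counter + most_common) agrees with B's (Boyer-Moore + count) on a nonempty label list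
lemma fma_entry_eq (acc : List (List (String × String))) (t : String) (L : List String) (hL : L ≠ []) :
    (let counter := PySem.Dict.counter L
     let total : Int := counter.values.sum
     match counter.items with
     | [] => acc
     | p :: rest =>
       let bv := fmaMostCommon p rest
       if 2 * bv.2 > total then acc ++ [[("text", t), ("label", bv.1)]] else acc) =
    (match (fmbBoyer L).1 with
     | none => acc
     | some c =>
       if 2 * (L.count c : Int) > (L.length : Int)
       then acc ++ [[("text", t), ("label", c)]] else acc) := by
  have hitems := PySem.Dict.items_counter L
  cases hI : (PySem.Dict.counter L).items with
  | nil =>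
    exfalso
    rw [hitems] at hI
    obtain ⟨y, hy⟩ := List.exists_mem_of_ne_nil L hL
    have hS : y ∈ PySem.Set.ofList L := (PySem.Set.mem_ofList L y).2 hy
    rw [List.map_eq_nil_iff] at hI
    simp [hI] at hS
  | cons p rest =>
    simp only [hI, fma_counter_sum]
    have hmemmap : ∀ q ∈ p :: rest, ∃ k, k ∈ L ∧ q = (k, (L.count k : Int)) := by
      intro q hq
      rw [← hI, hitems] at hq
      obtain ⟨k, hk, hkq⟩ := List.mem_map.1 hq
      exact ⟨k, (PySem.Set.mem_ofList L k).1 hk, hkq.symm⟩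
    obtain ⟨hmem, hge, hall⟩ := fma_mostCommon_spec p rest
    set bv := fmaMostCommon p rest with hbvdef
    have hbvmem : bv ∈ p :: rest := by
      rcases hmem with h | h
      · rw [h]; exact List.mem_cons_self
      · exact List.mem_cons_of_mem _ h
    obtain ⟨k, hkL, hbk⟩ := hmemmap bv hbvmem
    have hbv2 : bv.2 = (L.count bv.1 : Int) := by rw [hbk]
    have hmax : ∀ y ∈ L, (L.count y : Int) ≤ bv.2 := by
      intro y hy
      have hyS : (y, (L.count y : Int)) ∈ p :: rest := by
        rw [← hI, hitems]
        exact List.mem_map.2 ⟨y, (PySem.Set.mem_ofList L y).2 hy, rfl⟩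
      rcases List.mem_cons.1 hyS with h | h
      · have : ((y, (L.count y : Int)) : String × Int).2 ≤ bv.2 := by rw [h]; exact hge
        exact this
      · exact hall _ h
    by_cases hmaj : 2 * bv.2 > (L.length : Int)
    · obtain ⟨hnn, hinv⟩ := fmb_boyer_inv L
      have h1 := hinv bv.1
      have hcand : some bv.1 = (fmbBoyer L).1 := by
        by_contra h
        rw [if_neg h] at h1
        omega
      rw [if_pos hmaj, ← hcand]
      show acc ++ _ = if 2 * (L.count bv.1 : Int) > (L.length : Int)
        then acc ++ [[("text", t), ("label", bv.1)]] else acc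
      rw [if_pos (by rw [← hbv2]; exact hmaj)]
    · rw [if_neg hmaj]
      cases hc : (fmbBoyer L).1 with
      | none => rfl
      | some c =>
        show acc = if 2 * (L.count c : Int) > (L.length : Int)
          then acc ++ [[("text", t), ("label", c)]] else acc
        rw [if_neg ?hne]
        case hne =>
          by_cases hcL : c ∈ L
          · have := hmax c hcL
            omega
          · have : L.count c = 0 := List.count_eq_zero.2 hcL
            have hlen : 0 < L.length := List.length_pos_of_ne_nil hL
            rw [this]
            push_cast
            omega

-- A's grouping dict rewritten over the list of (text, label) pairs
lemma fma_group_eq_pairs (annotations : List (List (String × String))) :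
    fmaGroupA annotations =
      (annotations.map (fun ann => (fmbText ann, fmbLabel ann))).foldl
        (fun d q => d.modify q.1 [] (· ++ [q.2])) PySem.Dict.empty := by
  rw [List.foldl_map]; rfl

-- A's group of a text t is exactly B's filtered label list for t
lemma fma_group_getD (annotations : List (List (String × String))) (t : String) :
    (fmaGroupA annotations).getD t [] =
      (annotations.filter (fun ann => fmbText ann == t)).map fmbLabel := by
  rw [fma_group_eq_pairs, PySem.Dict.getD_foldl_modify_append, PySem.Dict.getD_empty]
  rw [List.filter_map, List.map_map]
  simp [Function.comp_def]

-- the keys of A's grouping dict are the deduped texts, in first-appearance order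
lemma fma_group_keys (annotations : List (List (String × String))) :
    (fmaGroupA annotations).keys = PySem.List.dedup (annotations.map fmbText) := by
  have h := PySem.Dict.keys_foldl_modify_key annotations
      (fun ann => PySem.Dict.getD (PySem.Dict.mk ann) "text" "") ([] : List String)
      (fun d ann v => v ++ [PySem.Dict.getD (PySem.Dict.mk ann) "label" ""])
      PySem.Dict.empty
  rw [show (fmaGroupA annotations).keys =
      PySem.Set.update (PySem.Dict.empty : PySem.Dict String (List String)).keys
        (annotations.map (fun ann => PySem.Dict.getD (PySem.Dict.mk ann) "text" "")) from h]
  simp [PySem.Dict.keys_empty, PySem.Set.update_nil_left]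
  rfl

lemma fma_group_nodup (annotations : List (List (String × String))) :
    (fmaGroupA annotations).keys.Nodup :=
  PySem.Dict.nodup_keys_foldl_modify_key annotations
    (fun ann => PySem.Dict.getD (PySem.Dict.mk ann) "text" "") []
    (fun _ ann v => v ++ [PySem.Dict.getD (PySem.Dict.mk ann) "label" ""])
    PySem.Dict.empty (by simp [PySem.Dict.keys_empty])

-- ===== VERDICT (by name: the statement is the Claim_ definition above) =====
theorem filter_majority_annotations_spec : Claim_equal_filter_majority_annotations := by
  intro annotations _ _
  unfold Spec_filter_majority_annotations filter_majority_annotations filter_majority_annotations_alt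
  rw [PySem.Dict.items_eq_map_keys (fmaGroupA annotations) (fma_group_nodup annotations) [],
      fma_group_keys, List.foldl_map]
  refine PySem.List.foldl_congr_mem _ _ _ _ (fun acc t ht => ?_)
  have hlab := fma_group_getD annotations t
  have hne : (annotations.filter (fun ann => fmbText ann == t)).map fmbLabel ≠ [] := by
    have htm : t ∈ annotations.map fmbText :=
      (PySem.List.mem_dedup (xs := annotations.map fmbText) (x := t)).1 ht
    obtain ⟨ann, hann, rfl⟩ := List.mem_map.1 htm
    intro hnil
    rw [List.map_eq_nil_iff, List.filter_eq_nil_iff] at hnil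
    exact hnil ann hann (by simp)
  rw [show ((t, (fmaGroupA annotations).getD t []) : String × List String).2 =
      (annotations.filter (fun ann => fmbText ann == t)).map fmbLabel from hlab]
  exact fma_entry_eq acc t _ hne
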